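-- pv_equiv track=rewrite | github.com/florenciaaltschuler/Introduccion-a-la-computacion | icb-master/Taller0/Taller0.py | jugar
-- ===== SOURCE A (Python) =====
-- def jugar(m):
-- #a la variable suma le voy sumando las cartas que saque el jugador, va a sacar cartas
-- #siempre que la longitud del mazo sea distinta a 0 y siempre y cuando el valor de la suma sea
-- #menor o igual a 21
--     i=0
--     suma=0
--     while suma <= 21:
--         if len(m)!=0:
--             suma=suma+m.pop(0)
--         else:
--             return suma
--     return suma
-- ===== SOURCE B (Python) =====
-- def jugar(m):
--     # Build all running prefix sums, find the first one exceeding 21,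
--     # then remove the consumed cards from m in one bulk delete.
--     sums = []
--     s = 0
--     for x in m:
--         s += x
--         sums.append(s)
--     total = sums[-1] if sums else 0
--     count = len(m)
--     for i, s in enumerate(sums):
--         if s > 21:
--             total = s
--             count = i + 1
--             break
--     del m[:count]
--     return total
-- ===== Notes on version B (the rewrite author's own statement) =====
-- stated objective: alternative
-- what changed: B replaces A's repeated pop(0)-and-check loop with a compute-all-prefix-sums / find-first-exceed scan / single bulk delete of the consumed prefix; it trades A's early exit for a full linear pass.
import Mathlib
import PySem

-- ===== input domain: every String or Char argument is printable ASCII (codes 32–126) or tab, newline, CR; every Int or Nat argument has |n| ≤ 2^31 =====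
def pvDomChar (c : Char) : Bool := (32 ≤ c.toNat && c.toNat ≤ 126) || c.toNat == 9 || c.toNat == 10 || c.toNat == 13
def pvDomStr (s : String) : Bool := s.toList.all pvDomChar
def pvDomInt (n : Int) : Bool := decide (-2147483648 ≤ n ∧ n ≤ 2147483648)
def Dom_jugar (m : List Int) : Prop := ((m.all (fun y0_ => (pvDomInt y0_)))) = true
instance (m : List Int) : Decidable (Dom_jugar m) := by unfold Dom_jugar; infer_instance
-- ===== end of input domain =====

-- B replaces A's pop(0)-and-check loop by a prefix-sums / first-exceed scan / bulk delete;
-- both mutate m identically in Python; the theorem here is about the return value.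
-- ===== PORT A =====
-- while suma <= 21: pop the front card and add it; return suma when the deck is empty
def jugarLoop (suma : Int) (m : List Int) : Int :=
  if suma ≤ 21 then
    match m with
    | [] => suma
    | x :: rest => jugarLoop (suma + x) rest
  else suma

def jugar (m : List Int) : Int := jugarLoop 0 m

-- ===== PORT B =====
-- running prefix sums of m, built front to back (Source B's first loop)
def prefixSums (s : Int) : List Int → List Int
  | [] => []
  | x :: rest => (s + x) :: prefixSums (s + x) rest

def jugar_alt (m : List Int) : Int :=
  let sums := prefixSums 0 m
  let total := match sums.getLast? with | some t => t | none => 0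
  match sums.find? (fun s => decide (21 < s)) with
  | some s => s
  | none => total

-- ===== PRECONDITION & SPEC =====
def Spec_jugar (m : List Int) (out : Int) : Prop := out = jugar_alt m
instance (m : List Int) (out : Int) : Decidable (Spec_jugar m out) := by unfold Spec_jugar; infer_instance

-- ===== CLAIM (what is proved, stated in full; the proofs are below) =====
def Claim_equal_jugar : Prop := ∀ (m : List Int), Dom_jugar m → Spec_jugar m (jugar m)

-- ===== LEMMAS AND PROOFS =====

-- ===== VERDICT (by name: the statement is the Claim_ definition above) =====
-- main invariant: the pop loop starting from suma = s equals the prefix-sum scan from s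
theorem jugarLoop_eq (m : List Int) : ∀ (s : Int), s ≤ 21 →
    jugarLoop s m =
      (match (prefixSums s m).find? (fun t => decide (21 < t)) with
       | some t => t
       | none => match (prefixSums s m).getLast? with | some t => t | none => s) := by
  induction m with
  | nil => intro s hs; simp [jugarLoop, prefixSums, hs]
  | cons x r ih =>
    intro s hs
    rw [jugarLoop]
    simp only [if_pos hs, prefixSums]
    by_cases h : 21 < s + x
    · have hns : ¬ (s + x ≤ 21) := by omega
      rw [jugarLoop.eq_def, if_neg hns]
      simp [List.find?, h]
    · have hle : s + x ≤ 21 := by omega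
      rw [ih (s + x) hle]
      simp only [List.find?, h, decide_false]
      cases hfind : (prefixSums (s + x) r).find? (fun t => decide (21 < t)) with
      | some t => simp
      | none =>
        simp only []
        cases hr : prefixSums (s + x) r with
        | nil => simp
        | cons a l =>
          cases hl : (a :: l).getLast? with
          | some t => simp [hl]
          | none => simp [List.getLast?_eq_none_iff] at hl

theorem jugar_spec : Claim_equal_jugar := by
  intro m _
  unfold Spec_jugar jugar jugar_alt
  rw [jugarLoop_eq m 0 (by norm_num)]
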